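-- pv_equiv track=rewrite | github.com/posl/comment_recommendation | script/split_gen/1_time/en/121_D/4.py | solve
-- ===== SOURCE A (Python) =====
-- def solve(a, b):
--     if a == b:
--         return a
--     elif a % 2 == 0 and b % 2 == 1:
--         return 1
--     elif a % 2 == 1 and b % 2 == 0:
--         return 0
--     elif a % 2 == 0 and b % 2 == 0:
--         return solve(a // 2, b // 2)
--     elif a % 2 == 1 and b % 2 == 1:
--         return solve(a // 2, b // 2) ^ 1
-- ===== SOURCE B (Python) =====
-- def solve(a, b):
--     if a == b:
--         return a
--     d, p = a - b, 1
--     while d % 2 == 0: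
--         d //= 2
--         p *= 2
--     return ((b // p) % 2) ^ (bin(b % p).count("1") % 2)
-- ===== Notes on version B (the rewrite author's own statement) =====
-- stated objective: alternative
-- what changed: Replaces A's per-bit recursion over both numbers with a closed-form combine: find p = largest power of two dividing a-b (the common low-bit prefix length), then answer = bit of b at that position XOR parity of the popcount of b's bits below it.
import Mathlib
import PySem

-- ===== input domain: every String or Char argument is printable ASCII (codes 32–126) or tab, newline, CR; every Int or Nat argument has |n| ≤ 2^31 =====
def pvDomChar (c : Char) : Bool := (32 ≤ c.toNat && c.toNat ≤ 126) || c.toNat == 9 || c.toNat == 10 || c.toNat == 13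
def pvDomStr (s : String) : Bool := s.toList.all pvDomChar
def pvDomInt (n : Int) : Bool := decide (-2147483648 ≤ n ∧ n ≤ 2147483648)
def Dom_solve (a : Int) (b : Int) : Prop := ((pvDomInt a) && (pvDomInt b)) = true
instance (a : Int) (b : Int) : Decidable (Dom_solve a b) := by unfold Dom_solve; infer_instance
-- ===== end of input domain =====

-- B replaces A's per-bit XOR recursion over both numbers by a different algorithm:
-- extract p = the largest power of two dividing a - b, then combine in closed form
-- (bit of b at that position XOR parity of the popcount of b's bits below it).
-- Objective: alternative; same asymptotic cost.

-- termination lemmas cited by the ports' decreasing_by (kept above for that reason):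
theorem pvDiffEq (a b : Int) (heq : PySem.Int.mod a 2 = PySem.Int.mod b 2) :
    a - b = 2 * (PySem.Int.floordiv a 2 - PySem.Int.floordiv b 2) := by
  rw [PySem.Int.floordiv_eq_ediv_of_pos (by norm_num : (0:Int) < 2),
      PySem.Int.floordiv_eq_ediv_of_pos (by norm_num : (0:Int) < 2)]
  rw [PySem.Int.mod_eq_emod_of_pos (by norm_num : (0:Int) < 2),
      PySem.Int.mod_eq_emod_of_pos (by norm_num : (0:Int) < 2)] at heq
  have ha := Int.mul_ediv_add_emod a 2
  have hb := Int.mul_ediv_add_emod b 2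
  linarith

theorem pvNeStep (a b : Int) (hne : a ≠ b) (heq : PySem.Int.mod a 2 = PySem.Int.mod b 2) :
    PySem.Int.floordiv a 2 ≠ PySem.Int.floordiv b 2 := by
  intro h
  apply hne
  have hd := pvDiffEq a b heq
  rw [h, sub_self, mul_zero] at hd
  exact sub_eq_zero.mp hd

theorem pvHalve (a b : Int) (hne : a ≠ b) (heq : PySem.Int.mod a 2 = PySem.Int.mod b 2) :
    (PySem.Int.floordiv a 2 - PySem.Int.floordiv b 2).natAbs < (a - b).natAbs := by
  have hd := pvDiffEq a b heq
  have h1 : 0 < (PySem.Int.floordiv a 2 - PySem.Int.floordiv b 2).natAbs :=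
    Int.natAbs_pos.mpr (sub_ne_zero.mpr (pvNeStep a b hne heq))
  rw [hd, Int.natAbs_mul]
  calc (PySem.Int.floordiv a 2 - PySem.Int.floordiv b 2).natAbs
      < 2 * (PySem.Int.floordiv a 2 - PySem.Int.floordiv b 2).natAbs := by omega
    _ = (2:Int).natAbs * (PySem.Int.floordiv a 2 - PySem.Int.floordiv b 2).natAbs := rfl

theorem pvHalveA (a b : Int) (hne : ¬ a = b)
    (h1 : ¬ (PySem.Int.mod a 2 = 0 ∧ PySem.Int.mod b 2 = 1))
    (h2 : ¬ (PySem.Int.mod a 2 = 1 ∧ PySem.Int.mod b 2 = 0)) :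
    (PySem.Int.floordiv a 2 - PySem.Int.floordiv b 2).natAbs < (a - b).natAbs := by
  apply pvHalve a b hne
  rcases PySem.Int.mod_two_eq a with ha | ha <;> rcases PySem.Int.mod_two_eq b with hb | hb
  · exact ha.trans hb.symm
  · exact absurd ⟨ha, hb⟩ h1
  · exact absurd ⟨ha, hb⟩ h2
  · exact ha.trans hb.symm

theorem pvLsbNe (d : Int) (h : d ≠ 0) (hm : PySem.Int.mod d 2 = 0) :
    PySem.Int.floordiv d 2 ≠ 0 := by
  rw [PySem.Int.floordiv_eq_ediv_of_pos (by norm_num : (0:Int) < 2)]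
  rw [PySem.Int.mod_eq_emod_of_pos (by norm_num : (0:Int) < 2)] at hm
  omega

theorem pvLsbDec (d : Int) (h : d ≠ 0) (hm : PySem.Int.mod d 2 = 0) :
    (PySem.Int.floordiv d 2).natAbs < d.natAbs := by
  rw [PySem.Int.floordiv_eq_ediv_of_pos (by norm_num : (0:Int) < 2)]
  rw [PySem.Int.mod_eq_emod_of_pos (by norm_num : (0:Int) < 2)] at hm
  omega

-- ===== PORT A =====
-- termination: in every recursive branch a ≠ b and a, b share their low bit,
-- so a - b is even and nonzero; (a - b).natAbs halves.
def solve (a : Int) (b : Int) : Int :=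
  if a = b then a
  else if PySem.Int.mod a 2 = 0 ∧ PySem.Int.mod b 2 = 1 then 1
  else if PySem.Int.mod a 2 = 1 ∧ PySem.Int.mod b 2 = 0 then 0
  else if PySem.Int.mod a 2 = 0 ∧ PySem.Int.mod b 2 = 0 then
    solve (PySem.Int.floordiv a 2) (PySem.Int.floordiv b 2)
  else -- a % 2 == 1 and b % 2 == 1 (the remaining case; Python's trailing elif)
    PySem.Int.bxor (solve (PySem.Int.floordiv a 2) (PySem.Int.floordiv b 2)) 1
termination_by (a - b).natAbs
decreasing_by
  · exact pvHalveA a b ‹_› ‹_› ‹_›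
  · exact pvHalveA a b ‹_› ‹_› ‹_›

-- ===== PORT B =====
-- Source B's while loop over (d, p); the proof argument h : d ≠ 0 is the loop's (true)
-- invariant, needed only for Lean's termination measure.
def lsbLoop (d : Int) (p : Int) (h : d ≠ 0) : Int :=
  if hm : PySem.Int.mod d 2 = 0 then
    lsbLoop (PySem.Int.floordiv d 2) (p * 2) (pvLsbNe d h hm)
  else p
termination_by d.natAbs
decreasing_by exact pvLsbDec d h hm

-- bin(x).count("1") is PySem.Int.bitCount (Python-exact)
def solve_alt (a : Int) (b : Int) : Int :=
  if h : a = b then a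
  else
    let p := lsbLoop (a - b) 1 (sub_ne_zero.mpr h)
    PySem.Int.bxor (PySem.Int.mod (PySem.Int.floordiv b p) 2)
      (PySem.Int.mod ((PySem.Int.bitCount (PySem.Int.mod b p) : Int)) 2)

-- ===== PRECONDITION & SPEC =====
def Spec_solve (a : Int) (b : Int) (out : Int) : Prop := out = solve_alt a b
instance (a : Int) (b : Int) (out : Int) : Decidable (Spec_solve a b out) := by unfold Spec_solve; infer_instance

-- ===== CLAIM (what is proved, stated in full; the proofs are below) =====
def Claim_equal_solve : Prop := ∀ (a : Int) (b : Int), Dom_solve a b → Spec_solve a b (solve a b)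

-- ===== LEMMAS AND PROOFS =====

theorem lsbLoop_scale (n : Nat) :
    ∀ (d : Int) (h : d ≠ 0) (p : Int), d.natAbs = n → lsbLoop d p h = p * lsbLoop d 1 h := by
  induction n using Nat.strong_induction_on with
  | _ n ih =>
    intro d h p hn
    rw [lsbLoop, lsbLoop]
    by_cases hm : PySem.Int.mod d 2 = 0
    · rw [dif_pos hm, dif_pos hm]
      have hdec := pvLsbDec d h hm
      rw [ih _ (by omega) _ (pvLsbNe d h hm) (p * 2) rfl,
          ih _ (by omega) _ (pvLsbNe d h hm) (1 * 2) rfl]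
      ring
    · rw [dif_neg hm, dif_neg hm]; ring

theorem lsbLoop_pos (n : Nat) :
    ∀ (d : Int) (h : d ≠ 0), d.natAbs = n → 0 < lsbLoop d 1 h := by
  induction n using Nat.strong_induction_on with
  | _ n ih =>
    intro d h hn
    rw [lsbLoop]
    by_cases hm : PySem.Int.mod d 2 = 0
    · rw [dif_pos hm]
      have hdec := pvLsbDec d h hm
      rw [lsbLoop_scale _ _ _ (1 * 2) rfl]
      have := ih _ (by omega) _ (pvLsbNe d h hm) rfl
      nlinarith
    · rw [dif_neg hm]; norm_num

theorem lsbLoop_congr (d d' p : Int) (h : d ≠ 0) (h' : d' ≠ 0) (e : d = d') :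
    lsbLoop d p h = lsbLoop d' p h' := by subst e; rfl

-- division/remainder of b by 2*q, re-expressed through b/2 and b%2
theorem pvCore (b q : Int) (hq : 0 < q) :
    b / (2 * q) = (b / 2) / q ∧ b % (2 * q) = 2 * ((b / 2) % q) + b % 2 := by
  have h2q : (0:Int) < 2 * q := by omega
  have h1 := Int.mul_ediv_add_emod b (2 * q)
  have hr0 : 0 ≤ b % (2 * q) := Int.emod_nonneg b (by omega)
  have hr1 : b % (2 * q) < 2 * q := Int.emod_lt_of_pos b h2q
  set Q := b / (2 * q) with hQ
  set r := b % (2 * q) with hr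
  have hb : b = 2 * (q * Q) + r := by linarith [h1]
  have hhalf : b / 2 = q * Q + r / 2 := by omega
  have hpar : b % 2 = r % 2 := by omega
  have hs0 : 0 ≤ r / 2 := by omega
  have hs1 : r / 2 < q := by omega
  have hmod : (b / 2) % q = r / 2 := by
    rw [hhalf, add_comm, Int.add_mul_emod_self_left (r/2) q Q, Int.emod_eq_of_lt hs0 hs1]
  have hdiv : (b / 2) / q = Q := by
    rw [hhalf, add_comm, Int.add_mul_ediv_left (r/2) Q (by omega : q ≠ 0),
        Int.ediv_eq_zero_of_lt hs0 hs1, zero_add]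
  exact ⟨hdiv.symm, by omega⟩

theorem solve_eq_closed (n : Nat) :
    ∀ (a b : Int) (h : a ≠ b), (a - b).natAbs = n →
      solve a b =
        PySem.Int.bxor (PySem.Int.mod (PySem.Int.floordiv b (lsbLoop (a - b) 1 (sub_ne_zero.mpr h))) 2)
          (PySem.Int.mod ((PySem.Int.bitCount (PySem.Int.mod b (lsbLoop (a - b) 1 (sub_ne_zero.mpr h))) : Int)) 2) := by
  induction n using Nat.strong_induction_on with
  | _ n ih =>
    intro a b h hn
    have h2 : (0:Int) < 2 := by norm_num
    have hma := Int.emod_two_eq_zero_or_one a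
    have hmb := Int.emod_two_eq_zero_or_one b
    by_cases heq : a % 2 = b % 2
    · -- low bits agree: A recurses; B's loop takes one step
      have hne : a / 2 ≠ b / 2 := by omega
      have hdec : (a / 2 - b / 2).natAbs < n := by omega
      have hmz : PySem.Int.mod (a - b) 2 = 0 := by
        rw [PySem.Int.mod_eq_emod_of_pos h2]; omega
      have hhalf : PySem.Int.floordiv (a - b) 2 = a / 2 - b / 2 := by
        rw [PySem.Int.floordiv_eq_ediv_of_pos h2]; omega
      have hfstep : ∀ (hh : a - b ≠ 0),
          lsbLoop (a - b) 1 hh = 2 * lsbLoop (a / 2 - b / 2) 1 (sub_ne_zero.mpr hne) := by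
        intro hh
        rw [lsbLoop, dif_pos hmz,
            lsbLoop_congr _ (a / 2 - b / 2) (1*2) _ (sub_ne_zero.mpr hne) hhalf,
            lsbLoop_scale (a / 2 - b / 2).natAbs _ _ (1*2) rfl]
        ring
      set q := lsbLoop (a / 2 - b / 2) 1 (sub_ne_zero.mpr hne) with hqdef
      have hq : 0 < q := lsbLoop_pos (a / 2 - b / 2).natAbs _ _ rfl
      have h2q : (0:Int) < 2 * q := by omega
      have hIH := ih _ hdec (a / 2) (b / 2) hne rfl
      rw [PySem.Int.floordiv_eq_ediv_of_pos hq, PySem.Int.mod_eq_emod_of_pos hq] at hIH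
      simp only [PySem.Int.mod_eq_emod_of_pos h2] at hIH
      obtain ⟨hdiv, hmod⟩ := pvCore b q hq
      have hbc : (PySem.Int.bitCount (b % (2 * q)) : Int) =
          b % 2 + (PySem.Int.bitCount ((b / 2) % q) : Int) := by
        by_cases hz : b % (2 * q) = 0
        · have hz2 : (b / 2) % q = 0 ∧ b % 2 = 0 := by constructor <;> omega
          rw [hz, hz2.1, hz2.2]; norm_num
        · have hpos : 0 < b % (2 * q) :=
            lt_of_le_of_ne (Int.emod_nonneg b (by omega)) (Ne.symm hz)
          rw [PySem.Int.bitCount_of_pos hpos]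
          have e1 : PySem.Int.mod (b % (2 * q)) 2 = b % 2 := by
            rw [PySem.Int.mod_eq_emod_of_pos h2]; omega
          have e2 : PySem.Int.floordiv (b % (2 * q)) 2 = (b / 2) % q := by
            rw [PySem.Int.floordiv_eq_ediv_of_pos h2]; omega
          rw [e1, e2]
          push_cast
          omega
      rw [hfstep (sub_ne_zero.mpr h),
          PySem.Int.floordiv_eq_ediv_of_pos h2q, PySem.Int.mod_eq_emod_of_pos h2q,
          solve, if_neg h]
      simp only [PySem.Int.mod_eq_emod_of_pos h2, PySem.Int.floordiv_eq_ediv_of_pos h2]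
      rw [hdiv, hbc]
      by_cases hodd : b % 2 = 1
      · -- both odd: A XORs the recursive value with 1
        rw [if_neg (by omega), if_neg (by omega), if_neg (by omega), hIH, hodd]
        set x := b / 2 / q % 2 with hx
        set c := (PySem.Int.bitCount ((b / 2) % q) : Int) with hc
        have hx01 : x = 0 ∨ x = 1 := Int.emod_two_eq_zero_or_one _
        have hct : c % 2 = 0 ∨ c % 2 = 1 := Int.emod_two_eq_zero_or_one c
        have h1c : (1 + c) % 2 = 1 - c % 2 := by omega
        rw [h1c]
        rcases hx01 with hx0 | hx0 <;> rw [hx0] <;>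
          rcases hct with hc1 | hc1 <;> rw [hc1] <;> decide
      · -- both even: A returns the recursive value unchanged
        have hb0 : b % 2 = 0 := by omega
        rw [if_neg (by omega), if_neg (by omega), if_pos ⟨by omega, hb0⟩, hIH, hb0]
        norm_num
    · -- low bits differ: B's loop exits immediately with p = 1
      have hmz : PySem.Int.mod (a - b) 2 ≠ 0 := by
        rw [PySem.Int.mod_eq_emod_of_pos h2]; omega
      rw [lsbLoop, dif_neg hmz,
          PySem.Int.floordiv_eq_ediv_of_pos (by norm_num : (0:Int) < 1),
          PySem.Int.mod_eq_emod_of_pos (by norm_num : (0:Int) < 1),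
          Int.ediv_one, Int.emod_one, solve, if_neg h]
      simp only [PySem.Int.mod_eq_emod_of_pos h2, PySem.Int.floordiv_eq_ediv_of_pos h2]
      by_cases hodd : b % 2 = 1
      · rw [if_pos ⟨by omega, hodd⟩, hodd]; decide
      · have hb0 : b % 2 = 0 := by omega
        rw [if_neg (by omega), if_pos ⟨by omega, hb0⟩, hb0]; decide

-- ===== VERDICT (by name: the statement is the Claim_ definition above) =====
theorem solve_spec : Claim_equal_solve := by
  intro a b _
  unfold Spec_solve solve_alt
  split
  · rename_i h; rw [solve, if_pos h]
  · rename_i h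
    exact solve_eq_closed (a - b).natAbs a b h rfl
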